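-- pv_equiv track=rewrite | github.com/Harsha8321/Log-Analyser | Final/testLogs.py | analyze_log_lines
-- ===== SOURCE A (Python) =====
-- from collections import Counter
--
-- def analyze_log_lines(lines):
--     levels = ["INFO", "WARNING", "ERROR", "DEBUG", "CRITICAL"]
--     level_counts = Counter()
--     messages = []
--     error_messages = []
--
--     for line in lines:
--         for level in levels:
--             if level in line:
--                 level_counts[level] += 1
--                 messages.append(line.strip())
--                 if level in ["ERROR", "CRITICAL"]:
--                     error_messages.append(line.strip())
--                 break
--
--     return level_counts, messages, error_messages
-- ===== SOURCE B (Python) =====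
-- from collections import Counter
--
-- def analyze_log_lines(lines):
--     levels = ["INFO", "WARNING", "ERROR", "DEBUG", "CRITICAL"]
--     # intermediate table: (stripped line, detected level) for lines with a level
--     table = []
--     for line in lines:
--         lvl = next((l for l in levels if l in line), None)
--         if lvl is not None:
--             table.append((line.strip(), lvl))
--     counts = {}
--     for _, lvl in table:
--         counts[lvl] = counts.get(lvl, 0) + 1
--     messages = [m for m, _ in table]
--     error_messages = [m for m, lvl in table if lvl in ("ERROR", "CRITICAL")]
--     return Counter(counts), messages, error_messages
-- ===== Notes on version B (the rewrite author's own statement) =====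
-- stated objective: alternative
-- what changed: B replaces A's single loop with interleaved in-place accumulation by building an intermediate (stripped line, detected level) table once and deriving the counts, messages and error messages in three separate passes (map / filter / dict fold) over that table.
import Mathlib
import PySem

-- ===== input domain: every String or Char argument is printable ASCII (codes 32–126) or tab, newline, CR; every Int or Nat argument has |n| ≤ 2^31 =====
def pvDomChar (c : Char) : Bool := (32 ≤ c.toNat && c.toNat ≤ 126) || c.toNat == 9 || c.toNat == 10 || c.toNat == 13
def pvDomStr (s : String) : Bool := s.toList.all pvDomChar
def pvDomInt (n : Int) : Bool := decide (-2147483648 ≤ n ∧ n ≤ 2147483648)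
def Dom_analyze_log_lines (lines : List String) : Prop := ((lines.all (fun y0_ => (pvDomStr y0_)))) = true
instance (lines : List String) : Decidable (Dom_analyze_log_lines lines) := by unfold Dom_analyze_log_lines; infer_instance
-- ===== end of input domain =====

-- B builds an intermediate (stripped line, level) table once and derives the three
-- outputs in separate passes, instead of A's single loop with three interleaved accumulators.

-- ===== PORT A =====
-- inner 'for level in levels: if level in line: …; break' loop, as structural recursion
def aInner (line : String)
    (st : PySem.Dict String Int × List String × List String) :
    List String → PySem.Dict String Int × List String × List String
  | [] => st
  | lvl :: rest =>
    if PySem.Str.isIn lvl line then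
      (st.1.modify lvl 0 (· + 1), st.2.1 ++ [PySem.Str.strip line],
       if lvl ∈ ["ERROR", "CRITICAL"] then st.2.2 ++ [PySem.Str.strip line] else st.2.2)
    else aInner line st rest

def analyze_log_lines (lines : List String) : (List (String × Int)) × List String × List String :=
  let levels := ["INFO", "WARNING", "ERROR", "DEBUG", "CRITICAL"]
  let st := lines.foldl (fun st line => aInner line st levels)
    ((PySem.Dict.empty : PySem.Dict String Int), ([] : List String), ([] : List String))
  (st.1.items, st.2.1, st.2.2)

-- ===== PORT B =====
def bLevels : List String := ["INFO", "WARNING", "ERROR", "DEBUG", "CRITICAL"]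

-- next((l for l in levels if l in line), None)
def bDetect (line : String) : Option String :=
  bLevels.find? (fun l => PySem.Str.isIn l line)

-- the intermediate table of (line.strip(), level) for lines with a detected level
def bTable (lines : List String) : List (String × String) :=
  lines.foldl (fun t line =>
    match bDetect line with
    | some l => t ++ [(PySem.Str.strip line, l)]
    | none => t) []

def analyze_log_lines_alt (lines : List String) : (List (String × Int)) × List String × List String :=
  let table := bTable lines
  let counts := table.foldl (fun d p => d.insert p.2 (d.getD p.2 0 + 1))
    (PySem.Dict.empty : PySem.Dict String Int)
  (counts.items, table.map Prod.fst,
   (table.filter (fun p => decide (p.2 ∈ ["ERROR", "CRITICAL"]))).map Prod.fst)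

-- ===== PRECONDITION & SPEC =====
def Spec_analyze_log_lines (lines : List String) (out : (List (String × Int)) × List String × List String) : Prop := out = analyze_log_lines_alt lines
instance (lines : List String) (out : (List (String × Int)) × List String × List String) : Decidable (Spec_analyze_log_lines lines out) := by unfold Spec_analyze_log_lines; infer_instance

-- ===== CLAIM (what is proved, stated in full; the proofs are below) =====
def Claim_equal_analyze_log_lines : Prop := ∀ (lines : List String), Dom_analyze_log_lines lines → Spec_analyze_log_lines lines (analyze_log_lines lines)

-- ===== LEMMAS AND PROOFS =====

-- proof-only: the table as a structural recursion
def tbl : List String → List (String × String)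
  | [] => []
  | line :: rest =>
    match bDetect line with
    | some l => (PySem.Str.strip line, l) :: tbl rest
    | none => tbl rest

-- B's fold builds exactly tbl, appended to the accumulator
theorem bTable_go (lines : List String) (t : List (String × String)) :
    lines.foldl (fun t line =>
      match bDetect line with
      | some l => t ++ [(PySem.Str.strip line, l)]
      | none => t) t = t ++ tbl lines := by
  induction lines generalizing t with
  | nil => simp [tbl]
  | cons line rest ih =>
    simp only [List.foldl_cons, tbl]
    cases bDetect line <;> simp [ih]

-- A's inner break-loop is a find? over the levels
theorem aInner_eq (levels : List String) (line : String)
    (c : PySem.Dict String Int) (m e : List String) :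
    aInner line (c, m, e) levels =
      match levels.find? (fun l => PySem.Str.isIn l line) with
      | none => (c, m, e)
      | some l =>
        (c.modify l 0 (· + 1), m ++ [PySem.Str.strip line],
         if l ∈ ["ERROR", "CRITICAL"] then e ++ [PySem.Str.strip line] else e) := by
  induction levels with
  | nil => simp [aInner]
  | cons lvl rest ih =>
    simp only [aInner, List.find?]
    cases h : PySem.Chars.isIn lvl.toList line.toList <;> simp [h, ih]

-- A's whole loop, characterised through the table
theorem aLoop_eq (lines : List String) (c : PySem.Dict String Int) (m e : List String) :
    lines.foldl (fun st line => aInner line st ["INFO", "WARNING", "ERROR", "DEBUG", "CRITICAL"]) (c, m, e) =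
      ((tbl lines).foldl (fun d p => d.insert p.2 (d.getD p.2 0 + 1)) c,
       m ++ (tbl lines).map Prod.fst,
       e ++ ((tbl lines).filter (fun p => decide (p.2 ∈ ["ERROR", "CRITICAL"]))).map Prod.fst) := by
  induction lines generalizing c m e with
  | nil => simp [tbl]
  | cons line rest ih =>
    simp only [List.foldl_cons, tbl]
    rw [aInner_eq]
    cases h : bDetect line with
    | none =>
      rw [show (["INFO", "WARNING", "ERROR", "DEBUG", "CRITICAL"].find? (fun l => PySem.Str.isIn l line)) = bDetect line from rfl, h]
      simp [ih]
    | some l =>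
      rw [show (["INFO", "WARNING", "ERROR", "DEBUG", "CRITICAL"].find? (fun l => PySem.Str.isIn l line)) = bDetect line from rfl, h]
      simp only []
      rw [ih]
      by_cases hec : l = "ERROR" ∨ l = "CRITICAL" <;>
        simp [hec, List.mem_cons, PySem.Dict.modify, List.foldl_cons]

-- ===== VERDICT (by name: the statement is the Claim_ definition above) =====
theorem analyze_log_lines_spec : Claim_equal_analyze_log_lines := by
  intro lines _
  show analyze_log_lines lines = analyze_log_lines_alt lines
  simp only [analyze_log_lines, analyze_log_lines_alt, bTable]
  rw [aLoop_eq, bTable_go]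
  simp
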